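-- pv_equiv track=rewrite | github.com/alexandermorgan/vis-framework | vizitka/models/aggregated_pieces.py | _make_date_range
-- ===== SOURCE A (Python) =====
-- def _make_date_range(dates):
--     """
--     Find the earliest and latest years in a list of music21 date strings.
--     Each string should use one of the following two formats:
--     - "----/--/--"
--     - "----/--/-- to ----/--/--"
--     where each - is an integer.
--     :param dates: The date strings to use.
--     :type dates: list of basesetring
--     :returns: The earliest and latest years in the list of dates.
--     :rtype: 2-tuple of string
--     **Examples**
--     >>> ranges = ['1987/09/09', '1865/12/08', '1993/08/08']
--     >>> AggregatedPieces._make_date_range(ranges)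
--     ('1865', '1993')
--     """
--     post = []
--     for poss_date in dates:
--         if len(poss_date) > len('----/--/--'):
--             # it's a date range, so we have "----/--/-- to ----/--/--"
--             try:
--                 post.append(int(poss_date[:4]))
--                 post.append(int(poss_date[14:18]))
--             except ValueError:
--                 pass
--         elif isinstance(poss_date, str):
--             try:
--                 post.append(int(poss_date[:4]))
--             except ValueError:
--                 pass
--     if [] != post:
--         return str(min(post)), str(max(post))
--     else:
--         return None
-- ===== SOURCE B (Python) =====
-- def _date_range(date):
--     """Range (lo, hi) of years parsed from one '----/--/--[ to ----/--/--]' string, or None."""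
--     if len(date) > 10:
--         try:
--             y1 = int(date[:4])
--         except ValueError:
--             return None
--         try:
--             y2 = int(date[14:18])
--         except ValueError:
--             return (y1, y1)
--         return (min(y1, y2), max(y1, y2))
--     try:
--         y = int(date[:4])
--     except ValueError:
--         return None
--     return (y, y)
--
--
-- def _merge(r1, r2):
--     if r1 is None:
--         return r2
--     if r2 is None:
--         return r1
--     return (min(r1[0], r2[0]), max(r1[1], r2[1]))
--
--
-- def _span(dates):
--     """Divide-and-conquer: merge the ranges of the two halves."""
--     if not dates:
--         return None
--     if len(dates) == 1:
--         return _date_range(dates[0])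
--     mid = len(dates) // 2
--     return _merge(_span(dates[:mid]), _span(dates[mid:]))
--
--
-- def _make_date_range(dates):
--     r = _span(dates)
--     return None if r is None else (str(r[0]), str(r[1]))
-- ===== Notes on version B (the rewrite author's own statement) =====
-- stated objective: alternative
-- what changed: B is a divide-and-conquer: each date string is mapped to an optional (lo, hi) range, the list is split in halves recursively and the two half-ranges are merged, instead of A's single forward pass appending every parsed year to one list and taking min/max at the end; correct because min/max merging is associative and order-independent.
import Mathlib
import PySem

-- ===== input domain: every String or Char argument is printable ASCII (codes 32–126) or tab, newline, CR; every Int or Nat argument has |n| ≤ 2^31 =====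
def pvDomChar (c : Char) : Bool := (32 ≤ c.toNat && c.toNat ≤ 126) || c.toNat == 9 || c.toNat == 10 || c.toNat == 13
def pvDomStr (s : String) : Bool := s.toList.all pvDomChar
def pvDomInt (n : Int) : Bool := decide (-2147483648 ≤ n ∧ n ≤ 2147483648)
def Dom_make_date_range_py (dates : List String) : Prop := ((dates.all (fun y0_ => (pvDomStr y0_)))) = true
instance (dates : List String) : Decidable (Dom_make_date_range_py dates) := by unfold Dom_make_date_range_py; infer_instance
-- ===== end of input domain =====

-- B replaces A's year-list + final min/max by a divide-and-conquer that merges optional (lo, hi) ranges of halves (alternative decomposition).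

-- ===== PORT A =====
-- one iteration of A's loop over 'post'
def mdr_body (post : List Int) (poss_date : String) : List Int :=
  let cs := poss_date.toList
  if PySem.Str.len poss_date > 10 then
    -- try: post.append(int(s[:4])); post.append(int(s[14:18])); except ValueError: pass
    match PySem.Int.ofChars? (PySem.List.slice cs none (some 4)) with
    | none => post
    | some y1 =>
      let post := post ++ [y1]
      match PySem.Int.ofChars? (PySem.List.slice cs (some 14) (some 18)) with
      | none => post
      | some y2 => post ++ [y2]
  else
    -- isinstance(poss_date, str) is always true here
    match PySem.Int.ofChars? (PySem.List.slice cs none (some 4)) with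
    | none => post
    | some y1 => post ++ [y1]

-- literal transliteration of A: build the list 'post' of parsed years, then min/max of it
def make_date_range_py (dates : List String) : Option (String × String) :=
  let post : List Int := dates.foldl mdr_body []
  if post = [] then none
  else
    match PySem.List.min? post (fun x => x), PySem.List.max? post (fun x => x) with
    | some mn, some mx => some (PySem.Int.toStr mn, PySem.Int.toStr mx)
    | _, _ => none

-- ===== PORT B =====
-- Source B's _date_range: optional (lo, hi) range of one date string
def date_range (date : String) : Option (Int × Int) :=
  let cs := date.toList
  if PySem.Str.len date > 10 then
    match PySem.Int.ofChars? (PySem.List.slice cs none (some 4)) with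
    | none => none
    | some y1 =>
      match PySem.Int.ofChars? (PySem.List.slice cs (some 14) (some 18)) with
      | none => some (y1, y1)
      | some y2 => some (min y1 y2, max y1 y2)
  else
    match PySem.Int.ofChars? (PySem.List.slice cs none (some 4)) with
    | none => none
    | some y => some (y, y)

-- Source B's _merge
def merge_range : Option (Int × Int) → Option (Int × Int) → Option (Int × Int)
  | none, r2 => r2
  | r1, none => r1
  | some (a, b), some (c, d) => some (min a c, max b d)

-- Source B's _span: divide and conquer over the halves
def span_mdr : List String → Option (Int × Int)
  | [] => none
  | [d] => date_range d
  | a :: b :: t =>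
    let dates := a :: b :: t
    let mid := dates.length / 2
    merge_range (span_mdr (dates.take mid)) (span_mdr (dates.drop mid))
termination_by l => l.length
decreasing_by
  · simp; omega
  · simp; omega

def make_date_range_py_alt (dates : List String) : Option (String × String) :=
  match span_mdr dates with
  | none => none
  | some (lo, hi) => some (PySem.Int.toStr lo, PySem.Int.toStr hi)

-- ===== PRECONDITION & SPEC =====
def Spec_make_date_range_py (dates : List String) (out : Option (String × String)) : Prop := out = make_date_range_py_alt dates
instance (dates : List String) (out : Option (String × String)) : Decidable (Spec_make_date_range_py dates out) := by unfold Spec_make_date_range_py; infer_instance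

-- ===== CLAIM (what is proved, stated in full; the proofs are below) =====
def Claim_equal_make_date_range_py : Prop := ∀ (dates : List String), Dom_make_date_range_py dates → Spec_make_date_range_py dates (make_date_range_py dates)

-- ===== LEMMAS AND PROOFS =====

-- the years A's loop body appends for one date string
def years_of (d : String) : List Int :=
  let cs := d.toList
  if PySem.Str.len d > 10 then
    match PySem.Int.ofChars? (PySem.List.slice cs none (some 4)) with
    | none => []
    | some y1 =>
      match PySem.Int.ofChars? (PySem.List.slice cs (some 14) (some 18)) with
      | none => [y1]
      | some y2 => [y1, y2]
  else
    match PySem.Int.ofChars? (PySem.List.slice cs none (some 4)) with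
    | none => []
    | some y1 => [y1]

-- the (min, max) span of a list of years
def spanOfYears : List Int → Option (Int × Int)
  | [] => none
  | x :: t => some (t.foldl min x, t.foldl max x)

theorem mdr_body_eq (post : List Int) (d : String) :
    mdr_body post d = post ++ years_of d := by
  unfold mdr_body years_of
  by_cases h : PySem.Str.len d > 10 <;> simp only [h, if_true, if_false] <;>
    cases PySem.Int.ofChars? (PySem.List.slice d.toList none (some 4)) <;>
    cases PySem.Int.ofChars? (PySem.List.slice d.toList (some 14) (some 18)) <;> simp

theorem mdr_post_eq (dates : List String) (post : List Int) :
    dates.foldl mdr_body post = post ++ dates.flatMap years_of := by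
  induction dates generalizing post with
  | nil => simp
  | cons d t ih => simp [mdr_body_eq, ih]

theorem date_range_eq (d : String) : date_range d = spanOfYears (years_of d) := by
  unfold date_range years_of
  by_cases h : PySem.Str.len d > 10 <;> simp only [h, if_true, if_false] <;>
    cases PySem.Int.ofChars? (PySem.List.slice d.toList none (some 4)) <;>
    cases PySem.Int.ofChars? (PySem.List.slice d.toList (some 14) (some 18)) <;>
      simp [spanOfYears]

theorem merge_span (xs ys : List Int) :
    merge_range (spanOfYears xs) (spanOfYears ys) = spanOfYears (xs ++ ys) := by
  cases xs with
  | nil => simp [spanOfYears, merge_range]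
  | cons x t =>
    cases ys with
    | nil => simp [spanOfYears, merge_range]
    | cons y s =>
      simp only [spanOfYears, merge_range, List.cons_append, List.foldl_cons,
        List.foldl_append, Option.some.injEq, Prod.mk.injEq]
      constructor
      · rw [← List.foldl_assoc (op := min), List.foldl_assoc (op := min)]
      · rw [← List.foldl_assoc (op := max), List.foldl_assoc (op := max)]

theorem span_mdr_eq (dates : List String) :
    span_mdr dates = spanOfYears (dates.flatMap years_of) := by
  induction dates using span_mdr.induct with
  | case1 => simp [span_mdr, spanOfYears]
  | case2 d => simp [span_mdr, date_range_eq]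
  | case3 a b t ih1 ih2 =>
    rename_i h1 h2
    rw [span_mdr]
    rw [h1, h2, merge_span, ← List.flatMap_append, List.take_append_drop]

-- ===== VERDICT (by name: the statement is the Claim_ definition above) =====
theorem make_date_range_py_spec : Claim_equal_make_date_range_py := by
  intro dates _
  unfold Spec_make_date_range_py make_date_range_py make_date_range_py_alt
  rw [mdr_post_eq, span_mdr_eq]
  cases h : dates.flatMap years_of with
  | nil => simp [spanOfYears]
  | cons x t => simp [spanOfYears, PySem.List.min?_id_cons, PySem.List.max?_id_cons]
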